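-- pv_equiv track=rewrite | github.com/pypi-data/pypi-mirror-374 | packages/olca2tidas/olca2tidas-0.1.6-py3-none-any.whl/olca2tidas/converter.py | _default_name_fields
-- ===== SOURCE A (Python) =====
-- def _slug(s: str) -> str:
--     return (s or "").strip().lower().replace(" ", "_").replace(">", "_").replace("\\", "_").replace("/", "_")
--
-- def _classes_from_category(cat: str):
--     """把 'A/B/C' 或 'A>B>C' 等切分为 common:class[level=i]"""
--     if not cat:
--         return [{
--             "@level": "0",
--             "@classId": "elementary_flows",
--             "#text": "Elementary flows"
--         }]
--     for delim in ["/", ">", "\\"]: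
--         if delim in cat:
--             parts = [p.strip() for p in cat.split(delim) if p.strip()]
--             break
--     else:
--         parts = [cat.strip()] if cat.strip() else []
--     classes = []
--     acc = []
--     for i, p in enumerate(parts):
--         acc.append(p)
--         classes.append({
--             "@level": str(i),
--             "@classId": _slug("/".join(acc)),
--             "#text": p
--         })
--     return classes or [{
--         "@level": "0",
--         "@classId": "uncategorized",
--         "#text": "Uncategorized"
--     }]
--
-- def _default_name_fields(type_of_ds: str, category_path: str):
--     classes = _classes_from_category(category_path)
--     tail = " / ".join([c["#text"] for c in classes[-2:]]) if len(classes) >= 2 else (classes[-1]["#text"] if classes else "")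
--     if type_of_ds == "Elementary flow":
--         tsr_en = f"{tail} - elementary flow" if tail else "Elementary flow"
--         tsr_zh = f"{tail} — 基元流" if tail else "基元流"
--         mix_en, mix_zh = "Elementary flow", "基元流"
--     elif type_of_ds == "Waste flow":
--         tsr_en = "Waste flow - treatment route not specified"
--         tsr_zh = "废物流 — 处理路线未指定"
--         mix_en, mix_zh = "Waste flow", "废物流"
--     else:
--         tsr_en = "Processing / production technology not specified"
--         tsr_zh = "加工 / 生产工艺未指定"
--         mix_en, mix_zh = "Production mix, in the factory", "生产混合，在工厂"
--     flowprop_en, flowprop_zh = "kg", "千克"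
--     return (
--         [{"#text": tsr_zh, "@xml:lang": "zh"}, {"#text": tsr_en, "@xml:lang": "en"}],
--         [{"#text": mix_zh, "@xml:lang": "zh"}, {"#text": mix_en, "@xml:lang": "en"}],
--         [{"#text": flowprop_zh, "@xml:lang": "zh"}, {"#text": flowprop_en, "@xml:lang": "en"}],
--     )
-- ===== SOURCE B (Python) =====
-- def _loc(zh, en):
--     return [{"#text": zh, "@xml:lang": "zh"}, {"#text": en, "@xml:lang": "en"}]
--
-- def _parts(cat):
--     # parse category_path once; same delimiter priority and fallback texts as A
--     if not cat:
--         return ["Elementary flows"]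
--     delim = next((d for d in ["/", ">", "\\"] if d in cat), None)
--     raw = cat.split(delim) if delim is not None else [cat]
--     parts = [p for p in (s.strip() for s in raw) if p]
--     return parts or ["Uncategorized"]
--
-- def _default_name_fields(type_of_ds, category_path):
--     if type_of_ds == "Elementary flow":
--         parts = _parts(category_path)
--         tail = parts[-1] if len(parts) == 1 else parts[-2] + " / " + parts[-1]
--         tsr = (tail + " \u2014 \u57fa\u5143\u6d41", tail + " - elementary flow")
--         mix = ("\u57fa\u5143\u6d41", "Elementary flow")
--     elif type_of_ds == "Waste flow":
--         tsr = ("\u5e9f\u7269\u6d41 \u2014 \u5904\u7406\u8def\u7ebf\u672a\u6307\u5b9a",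
--                "Waste flow - treatment route not specified")
--         mix = ("\u5e9f\u7269\u6d41", "Waste flow")
--     else:
--         tsr = ("\u52a0\u5de5 / \u751f\u4ea7\u5de5\u827a\u672a\u6307\u5b9a",
--                "Processing / production technology not specified")
--         mix = ("\u751f\u4ea7\u6df7\u5408\uff0c\u5728\u5de5\u5382",
--                "Production mix, in the factory")
--     return (_loc(*tsr), _loc(*mix), _loc("\u5343\u514b", "kg"))
-- ===== Notes on version B (the rewrite author's own statement) =====
-- stated objective: simpler
-- what changed: B drops the class-dict list entirely (@level/@classId/slug are never observed): it parses category_path only when type_of_ds is 'Elementary flow' (the only branch that uses it), picks the delimiter with find-first, maps strip then filters, takes the tail from the last one or two parts directly, and assembles all three returned lists through one _loc(zh,en) constructor instead of writing the dict pairs out per branch.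
import Mathlib
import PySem

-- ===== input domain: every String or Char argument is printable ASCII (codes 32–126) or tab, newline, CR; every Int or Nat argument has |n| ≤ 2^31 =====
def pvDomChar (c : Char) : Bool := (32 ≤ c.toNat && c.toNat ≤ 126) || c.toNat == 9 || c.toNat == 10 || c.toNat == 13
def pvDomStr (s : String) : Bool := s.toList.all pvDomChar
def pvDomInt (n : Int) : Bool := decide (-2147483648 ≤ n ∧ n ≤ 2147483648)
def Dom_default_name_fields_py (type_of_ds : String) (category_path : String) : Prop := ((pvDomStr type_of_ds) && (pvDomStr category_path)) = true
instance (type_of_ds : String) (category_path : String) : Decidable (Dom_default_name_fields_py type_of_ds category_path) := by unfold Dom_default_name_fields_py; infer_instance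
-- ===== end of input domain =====

-- B drops the never-observed @level/@classId/slug machinery: it parses the path only
-- in the one branch that uses it and builds every output list via one constructor
-- (objective: simpler).

-- ===== PORT A =====
def pvSlug (s : String) : String :=
  PySem.Str.replace (PySem.Str.replace (PySem.Str.replace (PySem.Str.replace
    (PySem.Str.lower (PySem.Str.strip (if s == "" then "" else s)))
    " " "_") ">" "_") "\\" "_") "/" "_"

-- c["#text"]; exact here: every dict built below carries the key "#text"
def pvText (c : List (String × String)) : String :=
  PySem.Dict.getD (PySem.Dict.mk c) "#text" ""

-- the 'for delim in ["/", ">", "\\"]: … break / else: …' loop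
def pvPickParts : List String → String → List String
  | [], cat => if PySem.Str.strip cat ≠ "" then [PySem.Str.strip cat] else []
  | d :: ds, cat =>
      if PySem.Str.isIn d cat then
        (((PySem.Str.split? cat d).getD []).filter (fun p => PySem.Str.strip p ≠ "")).map PySem.Str.strip
      else pvPickParts ds cat

def pvClassesFromCategory (cat : String) : List (List (String × String)) :=
  if cat == "" then
    [[("@level", "0"), ("@classId", "elementary_flows"), ("#text", "Elementary flows")]]
  else
    let parts := pvPickParts ["/", ">", "\\"] cat
    let st := (PySem.List.enumerate parts).foldl
      (fun (st : List String × List (List (String × String))) ip =>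
        let acc := st.1 ++ [ip.2]
        (acc, st.2 ++ [[("@level", PySem.Int.toStr ip.1),
                        ("@classId", pvSlug (PySem.Str.join "/" acc)),
                        ("#text", ip.2)]]))
      ([], [])
    if st.2 = [] then
      [[("@level", "0"), ("@classId", "uncategorized"), ("#text", "Uncategorized")]]
    else st.2

def default_name_fields_py (type_of_ds : String) (category_path : String) : (List (List (String × String))) × (List (List (String × String))) × (List (List (String × String))) :=
  let classes := pvClassesFromCategory category_path
  let tail : String :=
    if 2 ≤ classes.length then
      PySem.Str.join " / " ((PySem.List.slice classes (some (-2)) none).map pvText)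
    else if classes ≠ [] then pvText ((PySem.List.pyGet? classes (-1)).getD [])
    else ""
  if type_of_ds == "Elementary flow" then
    let tsr_en := if tail ≠ "" then tail ++ " - elementary flow" else "Elementary flow"
    let tsr_zh := if tail ≠ "" then tail ++ " — 基元流" else "基元流"
    ([[("#text", tsr_zh), ("@xml:lang", "zh")], [("#text", tsr_en), ("@xml:lang", "en")]],
     [[("#text", "基元流"), ("@xml:lang", "zh")], [("#text", "Elementary flow"), ("@xml:lang", "en")]],
     [[("#text", "千克"), ("@xml:lang", "zh")], [("#text", "kg"), ("@xml:lang", "en")]])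
  else if type_of_ds == "Waste flow" then
    ([[("#text", "废物流 — 处理路线未指定"), ("@xml:lang", "zh")], [("#text", "Waste flow - treatment route not specified"), ("@xml:lang", "en")]],
     [[("#text", "废物流"), ("@xml:lang", "zh")], [("#text", "Waste flow"), ("@xml:lang", "en")]],
     [[("#text", "千克"), ("@xml:lang", "zh")], [("#text", "kg"), ("@xml:lang", "en")]])
  else
    ([[("#text", "加工 / 生产工艺未指定"), ("@xml:lang", "zh")], [("#text", "Processing / production technology not specified"), ("@xml:lang", "en")]],
     [[("#text", "生产混合，在工厂"), ("@xml:lang", "zh")], [("#text", "Production mix, in the factory"), ("@xml:lang", "en")]],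
     [[("#text", "千克"), ("@xml:lang", "zh")], [("#text", "kg"), ("@xml:lang", "en")]])

-- ===== PORT B =====
def pvLoc (zh en : String) : List (List (String × String)) :=
  [[("#text", zh), ("@xml:lang", "zh")], [("#text", en), ("@xml:lang", "en")]]

def pvPartsB (cat : String) : List String :=
  if cat == "" then ["Elementary flows"]
  else
    let raw : List String :=
      match ["/", ">", "\\"].find? (fun d => PySem.Str.isIn d cat) with
      | some d => (PySem.Str.split? cat d).getD []
      | none => [cat]
    let parts := (raw.map PySem.Str.strip).filter (· ≠ "")
    if parts = [] then ["Uncategorized"] else parts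

def default_name_fields_py_alt (type_of_ds : String) (category_path : String) : (List (List (String × String))) × (List (List (String × String))) × (List (List (String × String))) :=
  let p :=
    if type_of_ds == "Elementary flow" then
      let tail : String :=
        match (pvPartsB category_path).reverse with
        | [x] => x
        | y :: x :: _ => x ++ " / " ++ y
        | [] => ""
      ((tail ++ " — 基元流", tail ++ " - elementary flow"), ("基元流", "Elementary flow"))
    else if type_of_ds == "Waste flow" then
      (("废物流 — 处理路线未指定", "Waste flow - treatment route not specified"), ("废物流", "Waste flow"))
    else
      (("加工 / 生产工艺未指定", "Processing / production technology not specified"),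
       ("生产混合，在工厂", "Production mix, in the factory"))
  (pvLoc p.1.1 p.1.2, pvLoc p.2.1 p.2.2, pvLoc "千克" "kg")

-- ===== PRECONDITION & SPEC =====
def Spec_default_name_fields_py (type_of_ds : String) (category_path : String) (out : (List (List (String × String))) × (List (List (String × String))) × (List (List (String × String)))) : Prop := out = default_name_fields_py_alt type_of_ds category_path
instance (type_of_ds : String) (category_path : String) (out : (List (List (String × String))) × (List (List (String × String))) × (List (List (String × String)))) : Decidable (Spec_default_name_fields_py type_of_ds category_path out) := by unfold Spec_default_name_fields_py; infer_instance

-- ===== CLAIM (what is proved, stated in full; the proofs are below) =====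
def Claim_equal_default_name_fields_py : Prop := ∀ (type_of_ds : String) (category_path : String), Dom_default_name_fields_py type_of_ds category_path → Spec_default_name_fields_py type_of_ds category_path (default_name_fields_py type_of_ds category_path)

-- ===== LEMMAS AND PROOFS =====

-- B's raw parts (before fallbacks), named here only for the proofs
def pvRawB (cat : String) : List String :=
  ((match ["/", ">", "\\"].find? (fun d => PySem.Str.isIn d cat) with
    | some d => ((PySem.Str.split? cat d).getD [] : List String)
    | none => [cat]).map PySem.Str.strip).filter (· ≠ "")

lemma pvPartsB_eq (cat : String) (hc : ¬ (cat == "") = true) :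
    pvPartsB cat = if pvRawB cat = [] then ["Uncategorized"] else pvRawB cat := by
  unfold pvPartsB pvRawB
  rw [if_neg hc]

lemma pvText_mk (a b p : String) :
    pvText [("@level", a), ("@classId", b), ("#text", p)] = p := by
  simp [pvText, PySem.Dict.getD, PySem.Dict.get?]

lemma filter_map_strip (l : List String) :
    ((l.filter (fun p => PySem.Str.strip p ≠ "")).map PySem.Str.strip)
      = (l.map PySem.Str.strip).filter (· ≠ "") := by
  induction l with
  | nil => rfl
  | cons hd tl ih =>
      simp only [ne_eq, decide_not] at ih ⊢
      simp only [List.map_cons, List.filter_cons]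
      by_cases h : PySem.Str.strip hd = "" <;> simp [h, ih]

lemma pvPickParts_eq (cat : String) : pvPickParts ["/", ">", "\\"] cat = pvRawB cat := by
  unfold pvRawB
  by_cases h1 : PySem.Str.isIn "/" cat = true <;>
    by_cases h2 : PySem.Str.isIn ">" cat = true <;>
    by_cases h3 : PySem.Str.isIn "\\" cat = true <;>
    simp only [pvPickParts, h1, h2, h3, List.find?, if_true, if_false, Bool.false_eq_true,
      filter_map_strip] <;>
    by_cases hs : PySem.Str.strip cat = "" <;>
    simp [hs]

lemma fold_texts (l : List (Int × String)) (acc : List String) (cls : List (List (String × String))) :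
    ((l.foldl
      (fun (st : List String × List (List (String × String))) ip =>
        let acc := st.1 ++ [ip.2]
        (acc, st.2 ++ [[("@level", PySem.Int.toStr ip.1),
                        ("@classId", pvSlug (PySem.Str.join "/" acc)),
                        ("#text", ip.2)]]))
      (acc, cls)).2).map pvText = cls.map pvText ++ l.map (·.2) := by
  induction l generalizing acc cls with
  | nil => simp
  | cons hd tl ih => simp [List.foldl_cons, ih, pvText_mk]

lemma map_pvText_classes (cat : String) :
    (pvClassesFromCategory cat).map pvText = pvPartsB cat := by
  unfold pvClassesFromCategory
  by_cases hc : (cat == "") = true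
  · have h0 : cat = "" := by simpa using hc
    simp [h0, pvPartsB, pvText_mk]
  · simp only [hc, Bool.false_eq_true, if_false]
    rw [pvPickParts_eq, pvPartsB_eq cat hc]
    have hmap := fold_texts (PySem.List.enumerate (pvRawB cat) 0) [] []
    simp only [PySem.List.map_snd_enumerate, List.map_nil, List.nil_append] at hmap
    by_cases hp : pvRawB cat = []
    · simp [hp, pvText_mk]
    · have hne : ((PySem.List.enumerate (pvRawB cat) 0).foldl
          (fun (st : List String × List (List (String × String))) ip =>
            let acc := st.1 ++ [ip.2]
            (acc, st.2 ++ [[("@level", PySem.Int.toStr ip.1),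
                            ("@classId", pvSlug (PySem.Str.join "/" acc)),
                            ("#text", ip.2)]]))
          ([], [])).2 ≠ [] := by
        intro h0; rw [h0] at hmap; exact hp hmap.symm
      simp only [if_neg hne, if_neg hp]
      exact hmap

lemma join_two (a b : String) : PySem.Str.join " / " [a, b] = a ++ " / " ++ b := by
  apply String.toList_inj.mp
  simp [PySem.Str.toList_join, PySem.Chars.join_cons_cons, PySem.Chars.join_singleton,
    String.toList_append]

lemma pvPartsB_ne_nil (cat : String) : pvPartsB cat ≠ [] := by
  by_cases hc : (cat == "") = true
  · simp [pvPartsB, hc]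
  · rw [pvPartsB_eq cat hc]
    split_ifs with h <;> simp [h]

lemma pvPartsB_mem_ne (cat : String) (x : String) (hx : x ∈ pvPartsB cat) : x ≠ "" := by
  by_cases hc : (cat == "") = true
  · simp [pvPartsB, hc] at hx; simp [hx]
  · rw [pvPartsB_eq cat hc] at hx
    split_ifs at hx with h
    · simp at hx; simp [hx]
    · unfold pvRawB at hx
      simp only [List.mem_filter] at hx
      simpa using hx.2

-- A's tail expression, computed over the classes list, equals B's last-one-or-two form.
lemma tail_eq (cat : String) :
    (let classes := pvClassesFromCategory cat
     if 2 ≤ classes.length then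
       PySem.Str.join " / " ((PySem.List.slice classes (some (-2)) none).map pvText)
     else if classes ≠ [] then pvText ((PySem.List.pyGet? classes (-1)).getD [])
     else "") =
    (match (pvPartsB cat).reverse with
     | [x] => x
     | y :: x :: _ => x ++ " / " ++ y
     | [] => "") := by
  have hmap := map_pvText_classes cat
  have hlen : (pvClassesFromCategory cat).length = (pvPartsB cat).length := by
    rw [← hmap, List.length_map]
  by_cases h2 : 2 ≤ (pvClassesFromCategory cat).length
  · simp only [if_pos h2]
    rw [PySem.List.slice_from_neg_ofNat _ 2 (by omega), List.map_drop, hmap, hlen]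
    have h2' : 2 ≤ (pvPartsB cat).length := hlen ▸ h2
    rcases hr : (pvPartsB cat).reverse with _ | ⟨y, _ | ⟨x, rest⟩⟩
    · exfalso
      have := congrArg List.length hr
      simp only [List.length_reverse, List.length_nil] at this; omega
    · exfalso
      have := congrArg List.length hr
      simp only [List.length_reverse, List.length_cons, List.length_nil] at this; omega
    · have hl : pvPartsB cat = (x :: rest).reverse ++ [y] := by
        have := congrArg List.reverse hr; simpa using this
      have hxy : pvPartsB cat = rest.reverse ++ [x, y] := by
        rw [hl]; simp
      have hdrop : (pvPartsB cat).drop ((pvPartsB cat).length - 2) = [x, y] := by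
        rw [hxy]
        have harith : (rest.reverse ++ [x, y]).length - 2 = rest.reverse.length := by simp
        rw [harith, List.drop_left]
      rw [hdrop, join_two]
  · have hcne : pvClassesFromCategory cat ≠ [] := by
      intro h0
      have := pvPartsB_ne_nil cat
      rw [← hmap, h0] at this; simp at this
    have hl1 : (pvClassesFromCategory cat).length = 1 := by
      have : (pvClassesFromCategory cat).length ≠ 0 := by
        simpa [List.length_eq_zero_iff] using hcne
      omega
    obtain ⟨c0, hc0⟩ := List.length_eq_one_iff.mp hl1
    have ht : pvPartsB cat = [pvText c0] := by rw [← hmap, hc0]; simp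
    simp only [ne_eq, hc0, ht, List.reverse_cons, List.reverse_nil, List.nil_append]
    simp [PySem.List.pyGet?, PySem.List.pyIdx?]

lemma tailB_ne (cat : String) :
    (match (pvPartsB cat).reverse with
     | [x] => x
     | y :: x :: _ => x ++ " / " ++ y
     | [] => "") ≠ "" := by
  rcases hr : (pvPartsB cat).reverse with _ | ⟨y, _ | ⟨x, rest⟩⟩
  · exact absurd (by simpa using congrArg List.reverse hr) (pvPartsB_ne_nil cat)
  · have hy : y ∈ pvPartsB cat := by
      have : y ∈ (pvPartsB cat).reverse := by rw [hr]; simp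
      simpa using this
    exact pvPartsB_mem_ne cat y hy
  · intro h
    have h' : x ++ " / " ++ y = "" := h
    have h0 : (x ++ " / " ++ y).length = 0 := by rw [h']; rfl
    have h3 : (" / " : String).length = 3 := rfl
    simp [String.length_append, h3] at h0

-- ===== VERDICT (by name: the statement is the Claim_ definition above) =====
theorem default_name_fields_py_spec : Claim_equal_default_name_fields_py := by
  intro type_of_ds category_path _
  unfold Spec_default_name_fields_py default_name_fields_py default_name_fields_py_alt
  have htail := tail_eq category_path
  have hne := tailB_ne category_path
  simp only [htail]
  split_ifs with h1 h2 <;> simp_all [pvLoc]
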